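-- pv_equiv track=rewrite | github.com/MichaelYcCho/Algorithm | programmers_lv0_1/23.06.07_82612.py | solution
-- ===== SOURCE A (Python) =====
-- def solution(price, money, count):
--     res = 0
--     for i in range(1,count+1):
--         res += price*i
--     if res >= money:
--         answer = res -money
--     else:
--         answer = 0
--
--
--     return answer
-- ===== SOURCE B (Python) =====
-- def solution(price, money, count):
--     total = price * count * (count + 1) // 2
--     return max(total - money, 0)
-- ===== Notes on version B (the rewrite author's own statement) =====
-- stated objective: faster
-- what changed: replaces the O(count) accumulation loop by the arithmetic-series closed form price*count*(count+1)//2 and a max with 0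
-- outside the precondition, e.g. on solution(3, 1, -3): A returns 0, B returns 8
import Mathlib
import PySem

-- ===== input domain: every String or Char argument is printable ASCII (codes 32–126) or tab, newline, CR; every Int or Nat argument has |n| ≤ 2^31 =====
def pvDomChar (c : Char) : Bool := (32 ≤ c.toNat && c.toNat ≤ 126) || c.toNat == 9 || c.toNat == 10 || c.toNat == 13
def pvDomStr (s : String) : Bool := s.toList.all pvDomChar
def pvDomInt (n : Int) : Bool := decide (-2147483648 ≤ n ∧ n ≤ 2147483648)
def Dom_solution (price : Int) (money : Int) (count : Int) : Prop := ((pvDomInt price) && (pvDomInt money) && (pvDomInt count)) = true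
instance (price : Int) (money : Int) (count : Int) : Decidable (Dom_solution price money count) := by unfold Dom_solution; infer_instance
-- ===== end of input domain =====

-- B replaces A's O(count) accumulation loop by the closed-form arithmetic series (objective: faster).

-- ===== PORT A =====
def solution (price : Int) (money : Int) (count : Int) : Int :=
  let res := (PySem.List.pyRange 1 (count + 1) 1).foldl (fun r i => r + price * i) 0
  if res ≥ money then res - money else 0

-- ===== PORT B =====
def solution_alt (price : Int) (money : Int) (count : Int) : Int :=
  let total := PySem.Int.floordiv (price * count * (count + 1)) 2
  max (total - money) 0

-- ===== PRECONDITION & SPEC =====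
-- Pre_ restricts to the natural domain count ≥ 0 (count is a number of payments);
-- on negative count A's range(1, count+1) is empty, so A's total of 0 there is an
-- artefact of the loop bounds that B's closed form does not reproduce.
def Pre_solution (price : Int) (money : Int) (count : Int) : Prop := 0 ≤ count
instance (price : Int) (money : Int) (count : Int) : Decidable (Pre_solution price money count) := by unfold Pre_solution; infer_instance
def pvWitness_solution : Int × Int × Int := (3, 20, 4)
def Spec_solution (price : Int) (money : Int) (count : Int) (out : Int) : Prop := out = solution_alt price money count
instance (price : Int) (money : Int) (count : Int) (out : Int) : Decidable (Spec_solution price money count out) := by unfold Spec_solution; infer_instance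

-- ===== CLAIM (what is proved, stated in full; the proofs are below) =====
def Claim_equal_solution : Prop := ∀ (price : Int) (money : Int) (count : Int), Dom_solution price money count → Pre_solution price money count → Spec_solution price money count (solution price money count)

-- ===== LEMMAS AND PROOFS =====

-- the loop of A computes the arithmetic series p * n * (n+1) / 2
theorem pv_loop_closed (p : Int) (n : Nat) :
    List.foldl (fun r i => r + p * i) 0 ((List.range n).map (fun k : Nat => (1 : Int) + (k : Int))) =
      PySem.Int.floordiv (p * n * (n + 1)) 2 := by
  induction n with
  | zero => simp [PySem.Int.floordiv]
  | succ m ih =>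
    simp only [List.range_succ, List.map_append, List.foldl_append]
    rw [ih]
    have h2 : (2:Int) ∣ ((m : Int) * (m + 1)) := Int.even_mul_succ_self (m : Int) |>.two_dvd
    obtain ⟨t, ht⟩ := h2
    have hfd : ∀ x : Int, PySem.Int.floordiv x 2 = x / 2 := fun x =>
      PySem.Int.floordiv_eq_ediv_of_pos (by norm_num)
    simp only [List.map_cons, List.map_nil, List.foldl_cons, List.foldl_nil, hfd]
    push_cast
    have h1 : p * (m : Int) * ((m : Int) + 1) = p * (2 * t) := by rw [← ht]; ring
    have h2' : p * ((m : Int) + 1) * ((m : Int) + 1 + 1) = p * (2 * (t + (m + 1))) := by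
      have : ((m:Int) + 1) * ((m:Int) + 1 + 1) = 2 * (t + (m + 1)) := by
        have : ((m:Int) + 1) * ((m:Int) + 1 + 1) = (m:Int) * ((m:Int)+1) + 2 * ((m:Int)+1) := by ring
        rw [this, ht]; ring
      calc p * ((m : Int) + 1) * ((m : Int) + 1 + 1) = p * (((m:Int) + 1) * ((m:Int) + 1 + 1)) := by ring
        _ = p * (2 * (t + (m + 1))) := by rw [this]
    rw [h1, h2']
    rw [show p * (2 * t) = 2 * (p * t) by ring, show p * (2 * (t + ((m:Int) + 1))) = 2 * (p * (t + ((m:Int)+1))) by ring]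
    rw [Int.mul_ediv_cancel_left _ (by norm_num), Int.mul_ediv_cancel_left _ (by norm_num)]
    ring

-- ===== VERDICT (by name: the statement is the Claim_ definition above) =====
theorem solution_spec : Claim_equal_solution := by
  intro price money count _ hpre
  unfold Spec_solution solution solution_alt
  have hc : count = ((count.toNat : Nat) : Int) := by
    simpa using (Int.toNat_of_nonneg hpre).symm
  rw [PySem.List.pyRange_one]
  have hlen : (count + 1 - 1) = count := by ring
  rw [hlen, hc, Int.toNat_natCast]
  rw [pv_loop_closed price count.toNat]
  simp only [max_def]
  split_ifs <;> omega
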